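-- pv_equiv track=rewrite | github.com/ChrisRenka/OCEV | evolucao_alternaPar.py | intParPop
-- ===== SOURCE A (Python) =====
-- def parN(n):
--
--     if(n%2 == 0):
--         return True
--     return False
--
-- def intParPop(matriz):
--
--     obj = []
--     POP = len(matriz)
--     D = len(matriz[0])
--
--     for i in range(0, POP):
--         objInd = intParIndiv(matriz[i])
--         obj.append(objInd)
--
--     return obj
--
-- def intParIndiv(indiv):
--
--     D = len(indiv)
--
--     obj = 0
--     for i in range(0, D-1):
--         if( not parN(indiv[i] + indiv[i+1]) ):
--             obj += 1
--
--     return obj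
-- ===== SOURCE B (Python) =====
-- def splitRuns(ps):
--     # groupby-style: peel off maximal runs of equal values
--     groups = []
--     rest = ps
--     while rest:
--         i = 1
--         while i < len(rest) and rest[i] == rest[0]:
--             i += 1
--         groups.append(rest[:i])
--         rest = rest[i:]
--     return groups
--
-- def intParPop(matriz):
--     obj = []
--     for indiv in matriz:
--         # staged: parity sequence -> maximal runs -> runs-1 (clamped at 0)
--         groups = splitRuns([x % 2 for x in indiv])
--         obj.append(max(len(groups) - 1, 0))
--     return obj
-- ===== Notes on version B (the rewrite author's own statement) =====
-- stated objective: alternative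
-- what changed: Per individual B builds the parity sequence, splits it groupby-style into maximal equal runs, and returns number-of-runs minus one (clamped at 0); A's index loop testing the parity of each adjacent sum through a helper predicate disappears.
-- outside the precondition, e.g. on intParPop([]): A raises IndexError, B returns []
import Mathlib
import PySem

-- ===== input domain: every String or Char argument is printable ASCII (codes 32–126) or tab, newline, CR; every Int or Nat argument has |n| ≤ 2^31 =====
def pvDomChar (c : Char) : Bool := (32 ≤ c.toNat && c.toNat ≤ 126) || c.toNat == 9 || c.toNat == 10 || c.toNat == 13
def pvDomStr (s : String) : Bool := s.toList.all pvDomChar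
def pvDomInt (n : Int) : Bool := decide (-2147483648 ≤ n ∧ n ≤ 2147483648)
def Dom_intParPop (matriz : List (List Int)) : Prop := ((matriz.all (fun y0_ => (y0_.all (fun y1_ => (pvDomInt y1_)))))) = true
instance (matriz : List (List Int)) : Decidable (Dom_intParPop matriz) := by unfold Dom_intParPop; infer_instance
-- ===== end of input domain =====

-- B stages the computation: parity sequence, groupby-style split into maximal equal runs,
-- answer = number of runs - 1 (clamped at 0), replacing A's per-pair odd-sum index scan.


-- ===== PORT A =====
def parN (n : Int) : Bool := if PySem.Int.mod n 2 = 0 then true else false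

-- indices i and i+1 are always in range (0 ≤ i < len-1), so pyGetD with default 0 is exact
def intParIndiv (indiv : List Int) : Int :=
  (PySem.List.pyRange 0 ((indiv.length : Int) - 1) 1).foldl
    (fun obj i =>
      if ¬ parN (PySem.List.pyGetD indiv i 0 + PySem.List.pyGetD indiv (i + 1) 0) then obj + 1
      else obj) 0

-- A also evaluates len(matriz[0]) (unused); on matriz = [] that raises IndexError — excluded by Pre_
def intParPop (matriz : List (List Int)) : List Int :=
  (PySem.List.pyRange 0 (matriz.length : Int) 1).foldl
    (fun obj i => obj ++ [intParIndiv (PySem.List.pyGetD matriz i [])]) []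

-- ===== PORT B =====
-- peel off the maximal run of elements equal to the head (Source B's inner scan + slice = span)
def splitRuns : List Int → List (List Int)
  | [] => []
  | p :: t =>
    (p :: t.takeWhile (· == p)) :: splitRuns (t.dropWhile (· == p))
  termination_by l => l.length
  decreasing_by simpa using Nat.lt_succ_of_le (t.length_dropWhile_le _)

def intParPop_alt (matriz : List (List Int)) : List Int :=
  matriz.map (fun indiv =>
    max (((splitRuns (indiv.map (fun x => PySem.Int.mod x 2))).length : Int) - 1) 0)

-- ===== PRECONDITION & SPEC =====
-- A reads len(matriz[0]), so it raises IndexError exactly when matriz is empty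
def Pre_intParPop (matriz : List (List Int)) : Prop := matriz ≠ []
instance (matriz : List (List Int)) : Decidable (Pre_intParPop matriz) := by unfold Pre_intParPop; infer_instance
def pvWitness_intParPop : List (List Int) := [[1, 2], [3, 3, 4]]

def Spec_intParPop (matriz : List (List Int)) (out : List Int) : Prop := out = intParPop_alt matriz
instance (matriz : List (List Int)) (out : List Int) : Decidable (Spec_intParPop matriz out) := by unfold Spec_intParPop; infer_instance

-- ===== CLAIM (what is proved, stated in full; the proofs are below) =====
def Claim_equal_intParPop : Prop := ∀ (matriz : List (List Int)), Dom_intParPop matriz → Pre_intParPop matriz → Spec_intParPop matriz (intParPop matriz)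

-- ===== LEMMAS AND PROOFS =====

-- count of parity changes along the list, starting from previous parity p
def ccp (p : Int) : List Int → Int
  | [] => 0
  | x :: t => (if PySem.Int.mod x 2 ≠ p then 1 else 0) + ccp (PySem.Int.mod x 2) t

-- count of value changes along an (already parity-mapped) list, starting from previous value p
def chg (p : Int) : List Int → Int
  | [] => 0
  | x :: t => (if x ≠ p then 1 else 0) + chg x t

-- offsetting the accumulator of the counting fold (specific to A's loop body)
theorem foldl_cnt_init (g : Int → Bool) (l : List Int) (init : Int) :
    l.foldl (fun obj i => if ¬ g i then obj + 1 else obj) init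
      = init + l.foldl (fun obj i => if ¬ g i then obj + 1 else obj) 0 := by
  induction l generalizing init with
  | nil => simp
  | cons x t ih =>
    simp only [List.foldl_cons]
    split_ifs with h
    · exact ih init
    · rw [ih (init + 1), ih (0 + 1)]
      ring

theorem ccp_nonneg (p : Int) (xs : List Int) : 0 ≤ ccp p xs := by
  induction xs generalizing p with
  | nil => simp [ccp]
  | cons x t ih =>
    have := ih (PySem.Int.mod x 2)
    simp only [ccp]; split_ifs <;> omega

-- ccp on xs is chg on the parity image of xs
theorem ccp_eq_chg_map (p : Int) (xs : List Int) :
    ccp p xs = chg p (xs.map (fun x => PySem.Int.mod x 2)) := by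
  induction xs generalizing p with
  | nil => simp [ccp, chg]
  | cons x t ih => simp only [ccp, chg, List.map_cons, ih]

-- a run of values all equal to the previous parity changes nothing
theorem chg_all_eq (p : Int) (run rest : List Int) (h : ∀ x ∈ run, x = p) :
    chg p (run ++ rest) = chg p rest := by
  induction run with
  | nil => simp
  | cons x t ih =>
    have hx : x = p := h x (by simp)
    simp only [List.cons_append, chg, hx, ne_eq, not_true_eq_false, if_false, zero_add]
    exact ih (fun y hy => h y (by simp [hy]))

-- the run decomposition counts exactly 1 + (number of changes after the head)
theorem splitRuns_length_cons (t : List Int) (p : Int) :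
    ((splitRuns (p :: t)).length : Int) = 1 + chg p t := by
  induction ht : t.length using Nat.strong_induction_on generalizing p t with
  | _ n ih =>
    rw [splitRuns]
    have hsplit : t.takeWhile (· == p) ++ t.dropWhile (· == p) = t :=
      List.takeWhile_append_dropWhile
    have hall : ∀ x ∈ t.takeWhile (· == p), x = p := by
      intro x hx
      have := List.mem_takeWhile_imp hx
      simpa using this
    have hchg : chg p t = chg p (t.dropWhile (· == p)) := by
      conv_lhs => rw [← hsplit]
      exact chg_all_eq p _ _ hall
    cases hd : t.dropWhile (· == p) with
    | nil => simp [hchg, hd, splitRuns, chg]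
    | cons q u =>
      have hq : ¬ (q = p) := by
        have := List.head_dropWhile_not (· == p) (l := t) (by simp [hd])
        simp [hd] at this; exact this
      have hlt : (q :: u).length ≤ t.length := by
        rw [← hd]; exact t.length_dropWhile_le _
      have := ih u.length (by subst ht; simp at hlt; omega) u q rfl
      simp only [List.length_cons]
      push_cast
      rw [hchg, hd]
      simp only [chg, if_pos hq]
      push_cast at this
      omega

-- A's index loop, reduced to a structural count over adjacent pairs
theorem parN_add (a b : Int) :
    (¬ parN (a + b)) ↔ PySem.Int.mod a 2 ≠ PySem.Int.mod b 2 := by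
  simp only [parN, PySem.Int.mod_eq_emod_of_pos (show (0:Int) < 2 by norm_num)]
  split_ifs with h <;> simp_all <;> omega

theorem intParIndiv_eq (xs : List Int) :
    intParIndiv xs = (match xs with
      | [] => 0
      | a :: t => ccp (PySem.Int.mod a 2) t) := by
  induction xs with
  | nil => simp [intParIndiv, PySem.List.pyRange_one_eq_nil]
  | cons a t ih =>
    cases t with
    | nil => simp [intParIndiv, PySem.List.pyRange_one_eq_nil, ccp]
    | cons b u =>
      simp only [intParIndiv] at ih ⊢
      have hlen : ((a :: b :: u).length : Int) - 1 = ((b :: u).length : Int) := by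
        simp
      rw [hlen, PySem.List.pyRange_one_cons (by simp)]
      simp only [List.foldl_cons, zero_add]
      have hshift : ∀ (init : Int),
          (PySem.List.pyRange 1 ((b :: u).length : Int)).foldl
            (fun obj i => if ¬ parN (PySem.List.pyGetD (a :: b :: u) i 0 +
                PySem.List.pyGetD (a :: b :: u) (i + 1) 0) then obj + 1 else obj) init
          = (PySem.List.pyRange 0 (((b :: u).length : Int) - 1)).foldl
            (fun obj i => if ¬ parN (PySem.List.pyGetD (b :: u) i 0 +
                PySem.List.pyGetD (b :: u) (i + 1) 0) then obj + 1 else obj) init := by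
        intro init
        have hmap : PySem.List.pyRange 1 ((b :: u).length : Int)
            = (PySem.List.pyRange 0 (((b :: u).length : Int) - 1)).map (· + 1) := by
          simp only [PySem.List.pyRange_one, List.map_map, Int.sub_zero]
          apply List.map_congr_left
          intro k _
          simp only [Function.comp_apply]
          omega
        rw [hmap, List.foldl_map]
        apply PySem.List.foldl_congr_mem
        intro acc i hi
        have h0 : 0 ≤ i := (PySem.List.mem_pyRange_one.mp hi).1
        lift i to ℕ using h0
        have hg1 : PySem.List.pyGetD (a :: b :: u) ((i : Int) + 1) 0
            = PySem.List.pyGetD (b :: u) (i : Int) 0 := by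
          have e : (i : Int) + 1 = ((i + 1 : Nat) : Int) := by push_cast; ring
          rw [e, PySem.List.pyGetD_natCast, PySem.List.pyGetD_natCast]
          simp
        have hg2 : PySem.List.pyGetD (a :: b :: u) ((i : Int) + 1 + 1) 0
            = PySem.List.pyGetD (b :: u) ((i : Int) + 1) 0 := by
          have e1 : (i : Int) + 1 + 1 = ((i + 2 : Nat) : Int) := by push_cast; ring
          have e2 : (i : Int) + 1 = ((i + 1 : Nat) : Int) := by push_cast; ring
          rw [e1, e2, PySem.List.pyGetD_natCast, PySem.List.pyGetD_natCast]
          simp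
        rw [hg1, hg2]
      rw [hshift, foldl_cnt_init
        (fun i => parN (PySem.List.pyGetD (b :: u) i 0 + PySem.List.pyGetD (b :: u) (i + 1) 0)),
        ih]
      have hga : PySem.List.pyGetD (a :: b :: u) 0 0 = a := by
        have : (0 : Int) = ((0 : Nat) : Int) := rfl
        rw [this, PySem.List.pyGetD_natCast]; simp
      have hgb : PySem.List.pyGetD (a :: b :: u) 1 0 = b := by
        have : (1 : Int) = ((1 : Nat) : Int) := by norm_num
        rw [this, PySem.List.pyGetD_natCast]; simp
      rw [hga, hgb]
      have hpar := parN_add a b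
      by_cases hq : parN (a + b)
      · have hne : PySem.Int.mod b 2 = PySem.Int.mod a 2 := by
          by_contra hc
          exact hpar.mpr (fun h => hc h.symm) hq
        have hne' : b % 2 = a % 2 := by
          simpa [PySem.Int.mod_eq_emod_of_pos (show (0:Int) < 2 by norm_num)] using hne
        simp [ccp, hq, hne']
      · have hne : PySem.Int.mod b 2 ≠ PySem.Int.mod a 2 := fun h => hpar.mp hq h.symm
        have hne' : ¬ (b % 2 = a % 2) := by
          simpa [PySem.Int.mod_eq_emod_of_pos (show (0:Int) < 2 by norm_num)] using hne
        simp [ccp, hq, hne']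

-- per individual, A's pair count equals B's runs-1 (clamped)
theorem indiv_eq_runs (xs : List Int) :
    intParIndiv xs
      = max (((splitRuns (xs.map (fun x => PySem.Int.mod x 2))).length : Int) - 1) 0 := by
  rw [intParIndiv_eq]
  cases xs with
  | nil => simp [splitRuns]
  | cons a t =>
    simp only [List.map_cons]
    rw [splitRuns_length_cons, ← ccp_eq_chg_map]
    have := ccp_nonneg (PySem.Int.mod a 2) t
    omega

-- ===== VERDICT (by name: the statement is the Claim_ definition above) =====
theorem intParPop_spec : Claim_equal_intParPop := by
  intro matriz _ _
  unfold Spec_intParPop intParPop intParPop_alt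
  rw [PySem.List.foldl_pyRange_zero_pyGetD' matriz [] (fun obj m => obj ++ [intParIndiv m]) []]
  rw [PySem.List.foldl_append_singleton_eq_map]
  exact List.map_congr_left (fun m _ => indiv_eq_runs m)
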